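-- pv_equiv track=rewrite | github.com/ChanchalSen09/github-connector | backend/app/api/routes/knowledge_bases.py | _parse_knowledge_base_body
-- ===== SOURCE A (Python) =====
-- _DESCRIPTION_PREFIX = "Description:"
--
-- _VECTOR_STORE_PREFIX = "Vector Store:"
--
-- _EMBEDDING_MODEL_PREFIX = "Embedding Model:"
--
-- def _parse_knowledge_base_body(body: str | None) -> tuple[str, str, str]:
--     description = "No description provided."
--     vector_store = "Unknown"
--     embedding_model = "Unknown"
--
--     for line in (body or "").splitlines():
--         if line.startswith(_DESCRIPTION_PREFIX):
--             description = line.removeprefix(_DESCRIPTION_PREFIX).strip() or description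
--         elif line.startswith(_VECTOR_STORE_PREFIX):
--             vector_store = line.removeprefix(_VECTOR_STORE_PREFIX).strip() or vector_store
--         elif line.startswith(_EMBEDDING_MODEL_PREFIX):
--             embedding_model = line.removeprefix(_EMBEDDING_MODEL_PREFIX).strip() or embedding_model
--
--     return description, vector_store, embedding_model
-- ===== SOURCE B (Python) =====
-- def _extract(lines, prefix, default):
--     result = default
--     for line in lines:
--         if line.startswith(prefix):
--             value = line.removeprefix(prefix).strip()
--             if value:
--                 result = value
--     return result
--
--
-- def _parse_knowledge_base_body(body):
--     lines = (body or "").splitlines()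
--     return (
--         _extract(lines, "Description:", "No description provided."),
--         _extract(lines, "Vector Store:", "Unknown"),
--         _extract(lines, "Embedding Model:", "Unknown"),
--     )
-- ===== Notes on version B (the rewrite author's own statement) =====
-- stated objective: simpler
-- what changed: Replaces the single fused if/elif pass mutating three variables with three independent per-field scans through one reusable _extract(lines, prefix, default) helper (last non-empty match wins).
import Mathlib
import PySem

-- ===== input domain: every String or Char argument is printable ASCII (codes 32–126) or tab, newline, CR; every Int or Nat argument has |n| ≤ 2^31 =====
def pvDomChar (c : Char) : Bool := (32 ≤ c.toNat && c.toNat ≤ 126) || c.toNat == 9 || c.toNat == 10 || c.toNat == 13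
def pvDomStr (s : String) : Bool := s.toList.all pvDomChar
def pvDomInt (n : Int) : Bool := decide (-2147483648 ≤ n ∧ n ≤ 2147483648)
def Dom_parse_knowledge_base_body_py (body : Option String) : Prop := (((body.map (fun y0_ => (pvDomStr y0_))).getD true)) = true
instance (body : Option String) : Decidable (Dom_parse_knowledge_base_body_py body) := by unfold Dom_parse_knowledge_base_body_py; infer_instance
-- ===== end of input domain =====

-- B replaces A's fused if/elif triple-state pass by three independent per-field scans through one reusable helper; objective: simpler decomposition (same cost).

-- shared primitive: Python's str.removeprefix (exact: removes the prefix when present, else returns s unchanged)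
def pyRemoveprefix (s p : String) : String :=
  if PySem.Str.startswith s p then String.mk (s.toList.drop p.toList.length) else s

-- ===== PORT A =====
def parse_knowledge_base_body_py (body : Option String) : String × String × String :=
  (PySem.Str.splitlines (body.getD "")).foldl
    (fun st line =>
      if PySem.Str.startswith line "Description:" then
        (let v := PySem.Str.strip (pyRemoveprefix line "Description:")
         if v = "" then st.1 else v, st.2.1, st.2.2)
      else if PySem.Str.startswith line "Vector Store:" then
        (st.1,
         (let v := PySem.Str.strip (pyRemoveprefix line "Vector Store:")
          if v = "" then st.2.1 else v), st.2.2)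
      else if PySem.Str.startswith line "Embedding Model:" then
        (st.1, st.2.1,
         (let v := PySem.Str.strip (pyRemoveprefix line "Embedding Model:")
          if v = "" then st.2.2 else v))
      else st)
    ("No description provided.", "Unknown", "Unknown")

-- ===== PORT B =====
def pvExtract (lines : List String) (pfx dflt : String) : String :=
  lines.foldl
    (fun result line =>
      if PySem.Str.startswith line pfx then
        let value := PySem.Str.strip (pyRemoveprefix line pfx)
        if value = "" then result else value
      else result)
    dflt

def parse_knowledge_base_body_py_alt (body : Option String) : String × String × String :=
  let lines := PySem.Str.splitlines (body.getD "")
  (pvExtract lines "Description:" "No description provided.",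
   pvExtract lines "Vector Store:" "Unknown",
   pvExtract lines "Embedding Model:" "Unknown")

-- ===== PRECONDITION & SPEC =====
def Spec_parse_knowledge_base_body_py (body : Option String) (out : String × String × String) : Prop := out = parse_knowledge_base_body_py_alt body
instance (body : Option String) (out : String × String × String) : Decidable (Spec_parse_knowledge_base_body_py body out) := by unfold Spec_parse_knowledge_base_body_py; infer_instance

-- ===== CLAIM (what is proved, stated in full; the proofs are below) =====
def Claim_equal_parse_knowledge_base_body_py : Prop := ∀ (body : Option String), Dom_parse_knowledge_base_body_py body → Spec_parse_knowledge_base_body_py body (parse_knowledge_base_body_py body)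

-- ===== LEMMAS AND PROOFS =====

-- two nonempty words with different first characters cannot both be prefixes of the same list
theorem pv_excl_aux (s : List Char) (phd qhd : Char) (pt qt : List Char) (h : phd ≠ qhd)
    (hp : (phd :: pt) <+: s) : ¬ ((qhd :: qt) <+: s) := by
  rintro ⟨u, hu⟩
  obtain ⟨t, ht⟩ := hp
  rw [← hu] at ht
  simp only [List.cons_append, List.cons.injEq] at ht
  exact h ht.1

theorem pv_sw_excl (s p q : String) (phd qhd : Char) (pt qt : List Char)
    (hp' : p.toList = phd :: pt) (hq' : q.toList = qhd :: qt) (h : phd ≠ qhd)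
    (hp : PySem.Str.startswith s p = true) : PySem.Str.startswith s q = false := by
  rw [← Bool.not_eq_true]
  intro hq
  rw [PySem.Str.startswith_eq, hp'] at hp
  rw [PySem.Str.startswith_eq, hq'] at hq
  exact pv_excl_aux s.toList phd qhd pt qt h
    ((PySem.Chars.startswith_iff _ _).mp hp) ((PySem.Chars.startswith_iff _ _).mp hq)

theorem pvExtract_cons (l : String) (ls : List String) (pfx dflt : String) :
    pvExtract (l :: ls) pfx dflt
    = pvExtract ls pfx
        (if PySem.Str.startswith l pfx then
           (let value := PySem.Str.strip (pyRemoveprefix l pfx)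
            if value = "" then dflt else value)
         else dflt) := rfl

theorem pv_fold_split (lines : List String) (d v e : String) :
    lines.foldl
      (fun st line =>
        if PySem.Str.startswith line "Description:" then
          (let w := PySem.Str.strip (pyRemoveprefix line "Description:")
           if w = "" then st.1 else w, st.2.1, st.2.2)
        else if PySem.Str.startswith line "Vector Store:" then
          (st.1,
           (let w := PySem.Str.strip (pyRemoveprefix line "Vector Store:")
            if w = "" then st.2.1 else w), st.2.2)
        else if PySem.Str.startswith line "Embedding Model:" then
          (st.1, st.2.1,
           (let w := PySem.Str.strip (pyRemoveprefix line "Embedding Model:")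
            if w = "" then st.2.2 else w))
        else st)
      (d, v, e)
    = (pvExtract lines "Description:" d, pvExtract lines "Vector Store:" v,
       pvExtract lines "Embedding Model:" e) := by
  induction lines generalizing d v e with
  | nil => rfl
  | cons l ls ih =>
    rw [List.foldl_cons, pvExtract_cons, pvExtract_cons, pvExtract_cons]
    by_cases hD : PySem.Str.startswith l "Description:" = true
    · have hV := pv_sw_excl l "Description:" "Vector Store:" 'D' 'V' "escription:".toList "ector Store:".toList rfl rfl (by decide) hD
      have hE := pv_sw_excl l "Description:" "Embedding Model:" 'D' 'E' "escription:".toList "mbedding Model:".toList rfl rfl (by decide) hD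
      simp only [hD, hV, hE, if_true, Bool.false_eq_true, if_false]
      exact ih _ _ _
    · by_cases hV : PySem.Str.startswith l "Vector Store:" = true
      · have hE := pv_sw_excl l "Vector Store:" "Embedding Model:" 'V' 'E' "ector Store:".toList "mbedding Model:".toList rfl rfl (by decide) hV
        simp only [hD, hV, hE, if_true, Bool.false_eq_true, if_false]
        exact ih _ _ _
      · by_cases hE : PySem.Str.startswith l "Embedding Model:" = true
        · simp only [hD, hV, hE, if_true, Bool.false_eq_true, if_false]
          exact ih _ _ _
        · simp only [hD, hV, hE, Bool.false_eq_true, if_false]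
          exact ih _ _ _

-- ===== VERDICT (by name: the statement is the Claim_ definition above) =====
theorem parse_knowledge_base_body_py_spec : Claim_equal_parse_knowledge_base_body_py := by
  intro body _
  unfold Spec_parse_knowledge_base_body_py parse_knowledge_base_body_py parse_knowledge_base_body_py_alt
  exact pv_fold_split _ _ _ _
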